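-- pv_equiv track=rewrite | github.com/Vansh-57/SmartLearn | DSA/arrays/count_subarrays.py | count_arr
-- ===== SOURCE A (Python) =====
-- def count_arr(arr,k,target):
--     window=sum(arr[:k])
--     count=0
--
--     if window > target:
--         count+=1
--     for i in range(k,len(arr)):
--         window=window - arr[i-k] + arr[i]
--         if window > target :
--             count+=1
--     return count
-- ===== SOURCE B (Python) =====
-- def count_arr(arr, k, target):
--     n = len(arr)
--     prefix = [0]
--     for x in arr:
--         prefix.append(prefix[-1] + x)
--     return sum(1 for i in range(n - k + 1) if prefix[i + k] - prefix[i] > target)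
-- ===== Notes on version B (the rewrite author's own statement) =====
-- stated objective: alternative
-- what changed: Replaced the incremental sliding-window update with a prefix-sum table built once, then a counting pass that reads each length-k window as a difference of two prefix entries (alternative decomposition, same O(n) cost).
-- intended difference: On inputs with k > len(arr) and sum(arr) > target, A returns 1 because it counts the truncated window sum(arr[:k]) as a length-k subarray, while B returns 0; since no length-k subarray exists, 0 is the intended count. — e.g. on count_arr([1], 2, 0): A returns 1, B returns 0
import Mathlib
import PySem

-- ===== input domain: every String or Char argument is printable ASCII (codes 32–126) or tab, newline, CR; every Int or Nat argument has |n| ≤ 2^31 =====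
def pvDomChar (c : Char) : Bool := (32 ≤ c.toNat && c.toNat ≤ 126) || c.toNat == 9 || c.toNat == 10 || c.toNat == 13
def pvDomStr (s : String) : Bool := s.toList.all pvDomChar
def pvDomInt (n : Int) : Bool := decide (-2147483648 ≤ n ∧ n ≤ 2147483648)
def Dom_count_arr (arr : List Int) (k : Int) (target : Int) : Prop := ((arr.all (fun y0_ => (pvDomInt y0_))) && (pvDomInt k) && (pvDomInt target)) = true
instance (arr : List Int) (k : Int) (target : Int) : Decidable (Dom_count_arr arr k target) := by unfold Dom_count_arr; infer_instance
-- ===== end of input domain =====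

-- B replaces A's incremental sliding-window update by a prefix-sum table built once and a
-- single counting pass over all length-k start positions (alternative decomposition, same O(n) cost).

-- ===== PORT A =====
def count_arr (arr : List Int) (k : Int) (target : Int) : Int :=
  let window := (PySem.List.slice arr none (some k)).sum
  let count : Int := if window > target then 1 else 0
  ((PySem.List.pyRange k (arr.length : Int) 1).foldl
    (fun (st : Int × Int) i =>
      let w := st.1 - PySem.List.pyGetD arr (i - k) 0 + PySem.List.pyGetD arr i 0
      (w, if w > target then st.2 + 1 else st.2))
    (window, count)).2

-- ===== PORT B =====
def count_arr_alt (arr : List Int) (k : Int) (target : Int) : Int :=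
  let n : Int := arr.length
  let pfx := arr.foldl (fun p x => p ++ [PySem.List.pyGetD p (-1) 0 + x]) [(0 : Int)]
  (PySem.List.pyRange 0 (n - k + 1) 1).foldl
    (fun c i =>
      if PySem.List.pyGetD pfx (i + k) 0 - PySem.List.pyGetD pfx i 0 > target then c + 1 else c)
    0

-- ===== PRECONDITION & SPEC =====
-- A raises IndexError on every input with k < 0 (its loop reads arr[i-k] past the end of the
-- list); Pre_ excludes exactly those inputs and nothing else.
def Pre_count_arr (arr : List Int) (k : Int) (target : Int) : Prop := 0 ≤ k
instance (arr : List Int) (k : Int) (target : Int) : Decidable (Pre_count_arr arr k target) := by unfold Pre_count_arr; infer_instance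
def pvWitness_count_arr : List Int × Int × Int := ([1, 2, 3], 2, 2)

-- On inputs with k > len(arr) and sum(arr) > target, A returns 1 because it counts the
-- truncated window sum(arr[:k]) as a length-k subarray, while B returns 0; since no length-k
-- subarray exists, 0 is the intended count.
def D_count_arr (arr : List Int) (k : Int) (target : Int) : Prop :=
  (arr.length : Int) < k ∧ target < arr.sum
instance (arr : List Int) (k : Int) (target : Int) : Decidable (D_count_arr arr k target) := by unfold D_count_arr; infer_instance

def Spec_count_arr (arr : List Int) (k : Int) (target : Int) (out : Int) : Prop := ¬ D_count_arr arr k target → out = count_arr_alt arr k target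
instance (arr : List Int) (k : Int) (target : Int) (out : Int) : Decidable (Spec_count_arr arr k target out) := by unfold Spec_count_arr; infer_instance

def pvDiffWitness_count_arr : List Int × Int × Int := ([1], 2, 0)
def pvDiffWitnessOut_count_arr : Int × Int := (1, 0)

-- ===== CLAIM (what is proved, stated in full; the proofs are below) =====
def Claim_unchanged_count_arr : Prop := ∀ (arr : List Int) (k : Int) (target : Int), Dom_count_arr arr k target → Pre_count_arr arr k target → Spec_count_arr arr k target (count_arr arr k target)
def Claim_changed_count_arr : Prop := Dom_count_arr (pvDiffWitness_count_arr.1) (pvDiffWitness_count_arr.2.1) (pvDiffWitness_count_arr.2.2) ∧ Pre_count_arr (pvDiffWitness_count_arr.1) (pvDiffWitness_count_arr.2.1) (pvDiffWitness_count_arr.2.2) ∧ D_count_arr (pvDiffWitness_count_arr.1) (pvDiffWitness_count_arr.2.1) (pvDiffWitness_count_arr.2.2) ∧ count_arr (pvDiffWitness_count_arr.1) (pvDiffWitness_count_arr.2.1) (pvDiffWitness_count_arr.2.2) = pvDiffWitnessOut_count_arr.1 ∧ count_arr_alt (pvDiffWitness_count_arr.1) (pvDiffWitness_count_arr.2.1)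 (pvDiffWitness_count_arr.2.2) = pvDiffWitnessOut_count_arr.2 ∧ pvDiffWitnessOut_count_arr.1 ≠ pvDiffWitnessOut_count_arr.2
def Claim_exact_count_arr : Prop := ∀ (arr : List Int) (k : Int) (target : Int), Dom_count_arr arr k target → Pre_count_arr arr k target → D_count_arr arr k target → count_arr arr k target ≠ count_arr_alt arr k target

-- ===== LEMMAS AND PROOFS =====

-- The window sum at start position s (length kn, clipped at the end of the list).
def winSum (arr : List Int) (kn : Nat) (s : Nat) : Int := ((arr.drop s).take kn).sum

-- A's result as a count over start positions 0, …, max(0, n-kn).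
def refCount (arr : List Int) (kn : Nat) (target : Int) : Int :=
  ((List.range (max 1 (arr.length - kn + 1))).countP
    (fun s => decide (target < winSum arr kn s)) : Nat)

theorem winSum_step (arr : List Int) (kn s : Nat) (h : s + kn < arr.length) :
    winSum arr kn s - PySem.List.pyGetD arr (s : Int) 0
      + PySem.List.pyGetD arr ((s + kn : Nat) : Int) 0 = winSum arr kn (s + 1) := by
  have hs : s < arr.length := by omega
  rw [PySem.List.pyGetD_natCast, PySem.List.pyGetD_natCast,
      List.getD_eq_getElem _ _ hs, List.getD_eq_getElem _ _ h]
  cases kn with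
  | zero => simp [winSum]
  | succ m =>
    have hdrop : arr.drop s = arr[s] :: arr.drop (s + 1) := List.drop_eq_getElem_cons hs
    have hm : m < (arr.drop (s + 1)).length := by rw [List.length_drop]; omega
    have hW : winSum arr (m + 1) s = arr[s] + ((arr.drop (s + 1)).take m).sum := by
      rw [winSum, hdrop, List.take_succ_cons, List.sum_cons]
    have hW' : winSum arr (m + 1) (s + 1)
        = ((arr.drop (s + 1)).take m).sum + (arr.drop (s + 1))[m] := by
      rw [winSum, List.take_succ, List.getElem?_eq_getElem hm]
      simp
    have hidx : (arr.drop (s + 1))[m] = arr[s + (m + 1)]'h := by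
      rw [List.getElem_drop]
      congr 1
      omega
    rw [hW, hW', hidx]
    ring

-- A's loop invariant: folding the sliding-window step over indices kn+s, …, n-1 counts the
-- windows at start positions s+1, …, s+t.
theorem slideA (arr : List Int) (kn : Nat) (target : Int) :
    ∀ (t s : Nat) (c : Int), kn + s + t = arr.length →
    ((List.range t).map (fun j => ((kn + s + j : Nat) : Int))).foldl
      (fun (st : Int × Int) i =>
        let w := st.1 - PySem.List.pyGetD arr (i - (kn : Int)) 0 + PySem.List.pyGetD arr i 0
        (w, if w > target then st.2 + 1 else st.2))
      (winSum arr kn s, c)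
    = (winSum arr kn (s + t),
       c + ((List.range t).countP (fun j => decide (target < winSum arr kn (s + 1 + j))) : Nat)) := by
  intro t
  induction t with
  | zero => intro s c h; simp
  | succ t ih =>
    intro s c h
    rw [List.range_succ_eq_map]
    simp only [List.map_cons, List.map_map, List.foldl_cons, Function.comp_def,
      Nat.succ_eq_add_one, Nat.add_zero, List.countP_cons, List.countP_map]
    have hidx1 : ((kn + s : Nat) : Int) - (kn : Int) = ((s : Nat) : Int) := by push_cast; ring
    have hstep : winSum arr kn s - PySem.List.pyGetD arr (((kn + s : Nat) : Int) - (kn : Int)) 0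
        + PySem.List.pyGetD arr ((kn + s : Nat) : Int) 0 = winSum arr kn (s + 1) := by
      rw [hidx1, show (kn + s) = s + kn by omega]
      exact winSum_step arr kn s (by omega)
    simp only [hstep]
    have hmap : ((List.range t).map (fun j => ((kn + s + (j + 1) : Nat) : Int)))
        = (List.range t).map (fun j => ((kn + (s + 1) + j : Nat) : Int)) := by
      apply List.map_congr_left; intro j _; congr 1; omega
    rw [hmap, ih (s + 1) (if winSum arr kn (s + 1) > target then c + 1 else c) (by omega)]
    simp only [Prod.mk.injEq]
    refine ⟨by rw [show s + (t + 1) = s + 1 + t from by omega], ?_⟩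
    have hcong : (List.range t).countP (fun j => decide (target < winSum arr kn (s + 1 + 1 + j)))
        = (List.range t).countP (fun j => decide (target < winSum arr kn (s + 1 + (j + 1)))) := by
      apply List.countP_congr; intro j _
      rw [show s + 1 + 1 + j = s + 1 + (j + 1) from by omega]
    rw [hcong]
    by_cases hp : target < winSum arr kn (s + 1)
    · simp only [if_pos (show winSum arr kn (s + 1) > target from hp), decide_eq_true hp]
      push_cast; ring
    · simp only [if_neg (show ¬ winSum arr kn (s + 1) > target from hp), decide_eq_false hp]
      simp

theorem countA_cast (arr : List Int) (kn : Nat) (target : Int) :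
    count_arr arr (kn : Int) target = refCount arr kn target := by
  unfold count_arr
  dsimp only
  rw [PySem.List.slice_to arr (Int.natCast_nonneg kn)]
  simp only [Int.toNat_natCast]
  by_cases hcase : (arr.length : Int) ≤ (kn : Int)
  · rw [PySem.List.pyRange_one_eq_nil hcase]
    simp only [List.foldl_nil]
    have hM : max 1 (arr.length - kn + 1) = 1 := by omega
    rw [refCount, hM]
    simp only [List.range_one, List.countP_cons, List.countP_nil, winSum, List.drop_zero,
      Nat.zero_add, gt_iff_lt]
    by_cases hp : target < (arr.take kn).sum
    · simp [hp]
    · simp [hp]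
  · push_neg at hcase
    rw [PySem.List.pyRange_one]
    have ht : ((arr.length : Int) - (kn : Int)).toNat = arr.length - kn := by omega
    rw [ht]
    have hmap : (List.range (arr.length - kn)).map (fun (j : Nat) => ((kn : Int) + (j : Int)))
        = (List.range (arr.length - kn)).map (fun (j : Nat) => ((kn + 0 + j : Nat) : Int)) := by
      apply List.map_congr_left; intro j _; push_cast; ring
    have hW0 : (arr.take kn).sum = winSum arr kn 0 := by simp [winSum]
    rw [hmap]
    simp only [hW0]
    rw [slideA arr kn target (arr.length - kn) 0
        (if winSum arr kn 0 > target then 1 else 0) (by omega)]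
    have hM : max 1 (arr.length - kn + 1) = arr.length - kn + 1 := by omega
    rw [refCount, hM, List.range_succ_eq_map]
    simp only [List.countP_cons, List.countP_map, Function.comp_def, Nat.succ_eq_add_one]
    have hc : (List.range (arr.length - kn)).countP
          (fun j => decide (target < winSum arr kn (0 + 1 + j)))
        = (List.range (arr.length - kn)).countP
          (fun j => decide (target < winSum arr kn (j + 1))) := by
      apply List.countP_congr; intro j _
      rw [show 0 + 1 + j = j + 1 from by omega]
    rw [hc]
    by_cases hp : target < winSum arr kn 0
    · simp [hp]; push_cast; ring
    · simp [hp]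

theorem countA_eq_ref (arr : List Int) (k target : Int) (hk : 0 ≤ k) :
    count_arr arr k target = refCount arr k.toNat target := by
  have hkk : ((k.toNat : Nat) : Int) = k := Int.toNat_of_nonneg hk
  conv_lhs => rw [← hkk]
  exact countA_cast arr k.toNat target

-- The prefix list B builds is the table of partial sums.
theorem prefix_eq (arr : List Int) :
    arr.foldl (fun p x => p ++ [PySem.List.pyGetD p (-1) 0 + x]) [(0 : Int)]
      = (List.range (arr.length + 1)).map (fun i => (arr.take i).sum) := by
  induction arr using List.reverseRecOn with
  | nil => simp
  | append_singleton xs x ih =>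
    rw [List.foldl_append, ih, List.foldl_cons, List.foldl_nil]
    rw [List.range_succ, List.map_append]
    simp only [List.map_cons, List.map_nil]
    rw [PySem.List.pyGetD_neg_one_append_singleton]
    have h1 : (List.range (xs.length + 1)).map (fun i => ((xs ++ [x]).take i).sum)
        = (List.range (xs.length + 1)).map (fun i => (xs.take i).sum) := by
      apply List.map_congr_left; intro i hi
      rw [List.take_append_of_le_length (by simpa using Nat.lt_succ_iff.mp (List.mem_range.mp hi))]
    rw [List.length_append, List.length_singleton, show xs.length + 1 + 1 = (xs.length + 1) + 1 from rfl,
      List.range_succ, List.map_append, h1]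
    simp only [List.map_cons, List.map_nil]
    have h2 : ((xs ++ [x]).take (xs.length + 1)).sum = (xs.take xs.length).sum + x := by
      rw [List.take_of_length_le (by simp), List.take_length]
      simp
    rw [h2, List.range_succ]
    simp

-- A window read off the prefix table is the window sum.
theorem window_eq (arr : List Int) (kn j : Nat) :
    (arr.take (j + kn)).sum - (arr.take j).sum = winSum arr kn j := by
  rw [List.take_add, List.sum_append, winSum]
  ring

theorem countB_cast (arr : List Int) (kn : Nat) (target : Int) :
    count_arr_alt arr (kn : Int) target
      = ((List.range (arr.length + 1 - kn)).countP
          (fun j => decide (target < winSum arr kn j)) : Nat) := by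
  unfold count_arr_alt
  dsimp only
  rw [prefix_eq, PySem.List.pyRange_one]
  have ht : (((arr.length : Int) - (kn : Int) + 1) - 0).toNat = arr.length + 1 - kn := by omega
  rw [ht, List.foldl_map]
  rw [PySem.List.foldl_ite_add_one
    (p := fun j : Nat =>
      PySem.List.pyGetD ((List.range (arr.length + 1)).map (fun i => (arr.take i).sum))
          ((0 + (j : Int)) + (kn : Int)) 0
        - PySem.List.pyGetD ((List.range (arr.length + 1)).map (fun i => (arr.take i).sum))
            (0 + (j : Int)) 0 > target)]
  norm_num
  apply List.countP_congr
  intro j hj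
  have hjlt : j < arr.length + 1 - kn := List.mem_range.mp hj
  have hcast : (j : Int) + (kn : Int) = ((j + kn : Nat) : Int) := by push_cast; ring
  have hv : ∀ m : Nat, m < arr.length + 1 →
      ((List.range (arr.length + 1)).map (fun i => (arr.take i).sum)).getD m 0
        = (arr.take m).sum := by
    intro m hm
    rw [List.getD_eq_getElem _ _ (by simpa using hm)]
    simp
  rw [hcast]
  simp only [PySem.List.pyGetD_natCast]
  rw [hv (j + kn) (by omega), List.getElem?_range (show j < arr.length + 1 by omega)]
  simp only [Option.map_some, Option.getD_some, window_eq arr kn j]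

theorem countB_eq_ref (arr : List Int) (k target : Int) (hk : 0 ≤ k)
    (hle : k ≤ (arr.length : Int)) :
    count_arr_alt arr k target = refCount arr k.toNat target := by
  have hkk : ((k.toNat : Nat) : Int) = k := Int.toNat_of_nonneg hk
  have h := countB_cast arr k.toNat target
  rw [hkk] at h
  rw [h, refCount, show arr.length + 1 - k.toNat = max 1 (arr.length - k.toNat + 1) from by omega]

theorem countB_big (arr : List Int) (k target : Int) (hk : 0 ≤ k)
    (hgt : (arr.length : Int) < k) :
    count_arr_alt arr k target = 0 := by
  have hkk : ((k.toNat : Nat) : Int) = k := Int.toNat_of_nonneg hk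
  have h := countB_cast arr k.toNat target
  rw [hkk] at h
  rw [h, show arr.length + 1 - k.toNat = 0 from by omega]
  simp

theorem countA_big (arr : List Int) (k target : Int) (hk : 0 ≤ k)
    (hgt : (arr.length : Int) < k) :
    count_arr arr k target = if target < arr.sum then 1 else 0 := by
  rw [countA_eq_ref arr k target hk, refCount,
      show max 1 (arr.length - k.toNat + 1) = 1 from by omega]
  have hw : winSum arr k.toNat 0 = arr.sum := by
    rw [winSum, List.drop_zero, List.take_of_length_le (by omega)]
  simp only [List.range_one, List.countP_cons, List.countP_nil, hw]
  by_cases hp : target < arr.sum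
  · simp [hp]
  · simp [hp]

-- ===== VERDICT (by name: the statement is the Claim_ definition above) =====
theorem count_arr_spec : Claim_unchanged_count_arr := by
  intro arr k target _ hk
  unfold Spec_count_arr
  intro hnd
  by_cases hle : k ≤ (arr.length : Int)
  · rw [countA_eq_ref arr k target hk, countB_eq_ref arr k target hk hle]
  · push_neg at hle
    have hsum : ¬ target < arr.sum := fun hs => hnd ⟨hle, hs⟩
    rw [countA_big arr k target hk hle, countB_big arr k target hk hle, if_neg hsum]

theorem count_arr_changed : Claim_changed_count_arr := by
  unfold Claim_changed_count_arr; decide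

theorem count_arr_tight : Claim_exact_count_arr := by
  intro arr k target _ hk hd
  rw [countA_big arr k target hk hd.1, countB_big arr k target hk hd.1, if_pos hd.2]
  decide
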